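-- pv_equiv track=rewrite | github.com/domaincrush/astro | ATBackend/server/marriage-analysis-engine.py | calculate_varna_koota
-- ===== SOURCE A (Python) =====
-- def calculate_varna_koota(nak1: int, nak2: int) -> int:
--     """Calculate Varna Koota compatibility"""
--     try:
--         # Simplified varna calculation
--         varna_map = {range(1, 8): 0, range(8, 15): 1, range(15, 22): 2, range(22, 28): 3}
--
--         varna1 = varna2 = 0
--         for r, v in varna_map.items():
--             if nak1 in r:
--                 varna1 = v
--             if nak2 in r:
--                 varna2 = v
--
--         return 1 if varna1 <= varna2 else 0
--     except:
--         return 0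
-- ===== SOURCE B (Python) =====
-- def calculate_varna_koota(nak1: int, nak2: int) -> int:
--     """Calculate Varna Koota compatibility (closed-form bucket)."""
--     varna1 = (nak1 - 1) // 7 if 1 <= nak1 <= 27 else 0
--     varna2 = (nak2 - 1) // 7 if 1 <= nak2 <= 27 else 0
--     return 1 if varna1 <= varna2 else 0
-- ===== Notes on version B (the rewrite author's own statement) =====
-- stated objective: simpler
-- what changed: Replaces the scan over the four-range varna table with a closed-form bucket (n-1)//7 for 1<=n<=27, exploiting the uniform 7-wide buckets.
import Mathlib
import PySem

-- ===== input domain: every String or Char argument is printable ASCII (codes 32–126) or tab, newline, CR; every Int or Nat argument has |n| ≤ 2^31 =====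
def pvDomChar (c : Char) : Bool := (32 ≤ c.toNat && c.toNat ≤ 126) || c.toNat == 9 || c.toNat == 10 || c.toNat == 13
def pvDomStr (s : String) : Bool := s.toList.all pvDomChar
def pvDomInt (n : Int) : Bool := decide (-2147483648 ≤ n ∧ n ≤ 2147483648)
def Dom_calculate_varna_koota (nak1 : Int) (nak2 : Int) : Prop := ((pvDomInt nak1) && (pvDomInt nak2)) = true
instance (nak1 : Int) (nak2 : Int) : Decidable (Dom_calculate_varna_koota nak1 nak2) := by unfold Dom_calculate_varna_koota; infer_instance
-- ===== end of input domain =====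

-- ===== PORT A =====
-- B changes: closed-form bucket (n-1)//7 instead of scanning the four-range table (objective: simpler).
def calculate_varna_koota (nak1 : Int) (nak2 : Int) : Int :=
  -- varna_map items in insertion order: (range(lo,hi), v)
  let varna_map : List ((Int × Int) × Int) := [((1, 8), 0), ((8, 15), 1), ((15, 22), 2), ((22, 28), 3)]
  let st := varna_map.foldl (fun (st : Int × Int) rv =>
    let r := rv.1; let v := rv.2
    let varna1 := if r.1 ≤ nak1 ∧ nak1 < r.2 then v else st.1
    let varna2 := if r.1 ≤ nak2 ∧ nak2 < r.2 then v else st.2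
    (varna1, varna2)) (0, 0)
  if st.1 ≤ st.2 then 1 else 0

-- ===== PORT B =====
def calculate_varna_koota_alt (nak1 : Int) (nak2 : Int) : Int :=
  let varna1 := if 1 ≤ nak1 ∧ nak1 ≤ 27 then PySem.Int.floordiv (nak1 - 1) 7 else 0
  let varna2 := if 1 ≤ nak2 ∧ nak2 ≤ 27 then PySem.Int.floordiv (nak2 - 1) 7 else 0
  if varna1 ≤ varna2 then 1 else 0

-- ===== PRECONDITION & SPEC =====
def Spec_calculate_varna_koota (nak1 : Int) (nak2 : Int) (out : Int) : Prop := out = calculate_varna_koota_alt nak1 nak2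
instance (nak1 : Int) (nak2 : Int) (out : Int) : Decidable (Spec_calculate_varna_koota nak1 nak2 out) := by unfold Spec_calculate_varna_koota; infer_instance

-- ===== CLAIM (what is proved, stated in full; the proofs are below) =====
def Claim_equal_calculate_varna_koota : Prop := ∀ (nak1 : Int) (nak2 : Int), Dom_calculate_varna_koota nak1 nak2 → Spec_calculate_varna_koota nak1 nak2 (calculate_varna_koota nak1 nak2)

-- ===== LEMMAS AND PROOFS =====

-- ===== VERDICT (by name: the statement is the Claim_ definition above) =====
theorem calculate_varna_koota_spec : Claim_equal_calculate_varna_koota := by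
  intro nak1 nak2 _
  unfold Spec_calculate_varna_koota calculate_varna_koota calculate_varna_koota_alt
  simp only [List.foldl, PySem.Int.floordiv]
  simp only [show ∀ a : Int, a.fdiv 7 = a / 7 from fun a => by rw [Int.fdiv_eq_ediv]; simp]
  split_ifs <;> omega
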